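-- pv_equiv track=rewrite | github.com/trahulprabhu38/ml-models | blood_report_og.py | categorize_blood_tests
-- ===== SOURCE A (Python) =====
-- def categorize_blood_tests(results):
--     """Categorize blood test results into panels for better display"""
--     categories = {
--         "Complete Blood Count (CBC)": ["RBC", "WBC", "Hb", "HCT", "MCV", "MCH", "MCHC", "RDW", "PLT", "MPV", "PDW", "PCT"],
--         "White Blood Cell Differential": ["Neutrophils", "Lymphocytes", "Monocytes", "Eosinophils", "Basophils",
--                                           "NeutrophilsAbs", "LymphocytesAbs", "MonocytesAbs", "EosinophilsAbs",
--                                           "BasophilsAbs", "Bands", "Segs"],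
--         "Kidney Function": ["BUN", "Creatinine", "eGFR", "BUN/Creatinine Ratio", "Uric Acid", "Cystatin C"],
--         "Electrolytes": ["Sodium", "Potassium", "Chloride", "Bicarbonate", "Carbon Dioxide", "Calcium",
--                          "Ionized Calcium", "Phosphorus", "Magnesium"],
--         "Liver Function": ["Total Protein", "Albumin", "Globulin", "A/G Ratio", "Total Bilirubin",
--                            "Direct Bilirubin", "Indirect Bilirubin", "Alkaline Phosphatase", "ALT", "AST",
--                            "GGT", "LDH"],
--         "Lipid Panel": ["Cholesterol", "Triglycerides", "HDL", "LDL", "VLDL", "Non-HDL", "TC/HDL Ratio",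
--                         "LDL/HDL Ratio", "ApoA", "ApoB", "Lp(a)"],
--         "Blood Glucose": ["Glucose", "FBS", "RBS", "HbA1c", "Insulin", "HOMA-IR", "C-Peptide"],
--         "Thyroid Function": ["TSH", "T3", "T4", "Free T3", "Free T4", "T3 Uptake", "Thyroglobulin", "TBG"],
--         "Iron Studies": ["Iron", "TIBC", "UIBC", "Transferrin", "Transferrin Saturation", "Ferritin"],
--         "Vitamins": ["Vitamin B12", "Folate", "Vitamin D", "25-OH Vitamin D", "1,25-OH Vitamin D",
--                      "Vitamin A", "Vitamin E", "Vitamin K"],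
--         "Inflammatory Markers": ["CRP", "hsCRP", "ESR", "Procalcitonin"],
--         "Coagulation Studies": ["PT", "INR", "aPTT", "Fibrinogen", "D-dimer"],
--         "Cardiac Markers": ["Troponin I", "Troponin T", "CK", "CK-MB", "BNP", "NT-proBNP", "Homocysteine"],
--         "Other": []  # Will hold tests that don't fit into above categories
--     }
--
--     categorized_results = {}
--     for category, tests in categories.items():
--         category_results = {}
--         for test in tests:
--             # Only include tests that are actually in the extracted values
--             if test in results:
--                 category_results[test] = results[test]
--
--         # Only add the category if it has at least one test with value
--         if category_results:
--             categorized_results[category] = category_results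
--
--     # Add any remaining tests to "Other" category
--     other_results = {}
--     for test, value in results.items():
--         if not any(test in tests for _, tests in categories.items() if _ != "Other"):
--             other_results[test] = value
--
--     if other_results:
--         categorized_results["Other"] = other_results
--
--     return categorized_results
-- ===== SOURCE B (Python) =====
-- PANELS = [
--     ("Complete Blood Count (CBC)", ["RBC", "WBC", "Hb", "HCT", "MCV", "MCH", "MCHC", "RDW", "PLT", "MPV", "PDW", "PCT"]),
--     ("White Blood Cell Differential", ["Neutrophils", "Lymphocytes", "Monocytes", "Eosinophils", "Basophils",
--                                        "NeutrophilsAbs", "LymphocytesAbs", "MonocytesAbs", "EosinophilsAbs",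
--                                        "BasophilsAbs", "Bands", "Segs"]),
--     ("Kidney Function", ["BUN", "Creatinine", "eGFR", "BUN/Creatinine Ratio", "Uric Acid", "Cystatin C"]),
--     ("Electrolytes", ["Sodium", "Potassium", "Chloride", "Bicarbonate", "Carbon Dioxide", "Calcium",
--                       "Ionized Calcium", "Phosphorus", "Magnesium"]),
--     ("Liver Function", ["Total Protein", "Albumin", "Globulin", "A/G Ratio", "Total Bilirubin",
--                         "Direct Bilirubin", "Indirect Bilirubin", "Alkaline Phosphatase", "ALT", "AST",
--                         "GGT", "LDH"]),
--     ("Lipid Panel", ["Cholesterol", "Triglycerides", "HDL", "LDL", "VLDL", "Non-HDL", "TC/HDL Ratio",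
--                      "LDL/HDL Ratio", "ApoA", "ApoB", "Lp(a)"]),
--     ("Blood Glucose", ["Glucose", "FBS", "RBS", "HbA1c", "Insulin", "HOMA-IR", "C-Peptide"]),
--     ("Thyroid Function", ["TSH", "T3", "T4", "Free T3", "Free T4", "T3 Uptake", "Thyroglobulin", "TBG"]),
--     ("Iron Studies", ["Iron", "TIBC", "UIBC", "Transferrin", "Transferrin Saturation", "Ferritin"]),
--     ("Vitamins", ["Vitamin B12", "Folate", "Vitamin D", "25-OH Vitamin D", "1,25-OH Vitamin D",
--                   "Vitamin A", "Vitamin E", "Vitamin K"]),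
--     ("Inflammatory Markers", ["CRP", "hsCRP", "ESR", "Procalcitonin"]),
--     ("Coagulation Studies", ["PT", "INR", "aPTT", "Fibrinogen", "D-dimer"]),
--     ("Cardiac Markers", ["Troponin I", "Troponin T", "CK", "CK-MB", "BNP", "NT-proBNP", "Homocysteine"]),
-- ]
--
-- # Inverted index: test name -> its panel name (built once from the fixed table).
-- PANEL_OF = {}
-- for _panel, _tests in PANELS:
--     for _t in _tests:
--         PANEL_OF[_t] = _panel
--
--
-- def categorize_blood_tests(results):
--     """Categorize blood test results into panels for better display"""
--     # Single pass over the results: group each (test, value) under its panel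
--     # (unknown tests go under "Other"), keeping the results' own order.
--     grouped = {}
--     for test, value in results.items():
--         grouped.setdefault(PANEL_OF.get(test, "Other"), {})[test] = value
--     # Assemble in the fixed panel order, each panel's tests in table order.
--     categorized_results = {}
--     for panel, tests in PANELS:
--         if panel in grouped:
--             g = grouped[panel]
--             categorized_results[panel] = {t: g[t] for t in tests if t in g}
--     if "Other" in grouped:
--         categorized_results["Other"] = grouped["Other"]
--     return categorized_results
-- ===== Notes on version B (the rewrite author's own statement) =====
-- stated objective: faster
-- what changed: A scans every panel's test list against the whole results dict and re-scans all categories per test for 'Other'; B builds one inverted test->panel index from the fixed table, groups the results in a single pass over results.items() (unknown tests fall into 'Other'), and then assembles the non-empty panels in table order.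
import Mathlib
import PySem

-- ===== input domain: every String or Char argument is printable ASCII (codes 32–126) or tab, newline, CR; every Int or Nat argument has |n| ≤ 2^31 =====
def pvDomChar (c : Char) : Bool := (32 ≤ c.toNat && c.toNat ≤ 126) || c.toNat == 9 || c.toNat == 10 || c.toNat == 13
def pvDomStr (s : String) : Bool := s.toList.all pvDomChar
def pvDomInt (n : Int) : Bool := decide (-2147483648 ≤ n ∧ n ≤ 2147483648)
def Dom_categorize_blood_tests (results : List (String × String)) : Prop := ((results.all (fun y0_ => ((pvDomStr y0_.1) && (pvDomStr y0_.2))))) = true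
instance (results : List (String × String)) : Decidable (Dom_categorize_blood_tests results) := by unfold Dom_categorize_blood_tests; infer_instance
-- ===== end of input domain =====

-- B replaces A's per-panel scans (and the per-test any() scan over all categories for "Other") by one
-- inverted test->panel index built once from the fixed table plus a single grouping pass over the results
-- (measurably faster: O(n+T) instead of O(n*T)).
-- Equivalence is about the RETURN value; neither program mutates its argument.

set_option maxRecDepth 100000

-- ===== PORT A =====
-- the fixed categories table (the 13 named panels, in source order; "Other" is appended where A's dict literal has it)
def pvTable : List (String × List String) := [
  ("Complete Blood Count (CBC)", ["RBC", "WBC", "Hb", "HCT", "MCV", "MCH", "MCHC", "RDW", "PLT", "MPV", "PDW", "PCT"]),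
  ("White Blood Cell Differential", ["Neutrophils", "Lymphocytes", "Monocytes", "Eosinophils", "Basophils", "NeutrophilsAbs", "LymphocytesAbs", "MonocytesAbs", "EosinophilsAbs", "BasophilsAbs", "Bands", "Segs"]),
  ("Kidney Function", ["BUN", "Creatinine", "eGFR", "BUN/Creatinine Ratio", "Uric Acid", "Cystatin C"]),
  ("Electrolytes", ["Sodium", "Potassium", "Chloride", "Bicarbonate", "Carbon Dioxide", "Calcium", "Ionized Calcium", "Phosphorus", "Magnesium"]),
  ("Liver Function", ["Total Protein", "Albumin", "Globulin", "A/G Ratio", "Total Bilirubin", "Direct Bilirubin", "Indirect Bilirubin", "Alkaline Phosphatase", "ALT", "AST", "GGT", "LDH"]),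
  ("Lipid Panel", ["Cholesterol", "Triglycerides", "HDL", "LDL", "VLDL", "Non-HDL", "TC/HDL Ratio", "LDL/HDL Ratio", "ApoA", "ApoB", "Lp(a)"]),
  ("Blood Glucose", ["Glucose", "FBS", "RBS", "HbA1c", "Insulin", "HOMA-IR", "C-Peptide"]),
  ("Thyroid Function", ["TSH", "T3", "T4", "Free T3", "Free T4", "T3 Uptake", "Thyroglobulin", "TBG"]),
  ("Iron Studies", ["Iron", "TIBC", "UIBC", "Transferrin", "Transferrin Saturation", "Ferritin"]),
  ("Vitamins", ["Vitamin B12", "Folate", "Vitamin D", "25-OH Vitamin D", "1,25-OH Vitamin D", "Vitamin A", "Vitamin E", "Vitamin K"]),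
  ("Inflammatory Markers", ["CRP", "hsCRP", "ESR", "Procalcitonin"]),
  ("Coagulation Studies", ["PT", "INR", "aPTT", "Fibrinogen", "D-dimer"]),
  ("Cardiac Markers", ["Troponin I", "Troponin T", "CK", "CK-MB", "BNP", "NT-proBNP", "Homocysteine"])
]

def categorize_blood_tests (results : List (String × String)) : List (String × List (String × String)) :=
  let rd := PySem.Dict.mk results
  let categories : PySem.Dict String (List String) := PySem.Dict.ofList (pvTable ++ [("Other", [])])
  let categorized := categories.items.foldl (fun acc ct =>
    let cr := ct.2.foldl (fun (cr : PySem.Dict String String) t =>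
      match rd.get? t with            -- 'if test in results: category_results[test] = results[test]'
      | some v => cr.insert t v
      | none => cr) (PySem.Dict.empty : PySem.Dict String String)
    if cr.items ≠ [] then acc.insert ct.1 cr else acc) (PySem.Dict.empty : PySem.Dict String (PySem.Dict String String))
  let other := rd.items.foldl (fun o tv =>
    if categories.items.any (fun p => decide (p.1 ≠ "Other") && p.2.contains tv.1) then o
    else o.insert tv.1 tv.2) (PySem.Dict.empty : PySem.Dict String String)
  let categorized := if other.items ≠ [] then categorized.insert "Other" other else categorized
  categorized.items.map (fun cd => (cd.1, cd.2.items))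

-- ===== PORT B =====
-- inverted index: test name -> its panel name (module-level constant in Source B)
def pvPanelOf : PySem.Dict String String :=
  pvTable.foldl (fun d ct => ct.2.foldl (fun d t => d.insert t ct.1) d) PySem.Dict.empty

def categorize_blood_tests_alt (results : List (String × String)) : List (String × List (String × String)) :=
  let rd := PySem.Dict.mk results
  let grouped := rd.items.foldl (fun g tv =>
    g.modify (pvPanelOf.getD tv.1 "Other") PySem.Dict.empty (fun d => d.insert tv.1 tv.2)) (PySem.Dict.empty : PySem.Dict String (PySem.Dict String String))
  let out := pvTable.foldl (fun out ct =>
    if grouped.contains ct.1 then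
      let g := grouped.getD ct.1 PySem.Dict.empty
      out.insert ct.1 (ct.2.foldl (fun (cr : PySem.Dict String String) t =>
        match g.get? t with           -- '{t: g[t] for t in tests if t in g}'
        | some v => cr.insert t v
        | none => cr) (PySem.Dict.empty : PySem.Dict String String))
    else out) (PySem.Dict.empty : PySem.Dict String (PySem.Dict String String))
  let out := if grouped.contains "Other" then out.insert "Other" (grouped.getD "Other" PySem.Dict.empty) else out
  out.items.map (fun cd => (cd.1, cd.2.items))

-- ===== PRECONDITION & SPEC =====
-- Pre_ excludes association lists with duplicate keys: A's parameter is a Python dict, in which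
-- duplicate keys are not representable, so such lists do not correspond to any input A was written for.
def Pre_categorize_blood_tests (results : List (String × String)) : Prop :=
  (results.map Prod.fst).Nodup
instance (results : List (String × String)) : Decidable (Pre_categorize_blood_tests results) := by
  unfold Pre_categorize_blood_tests; infer_instance
def pvWitness_categorize_blood_tests : (List (String × String)) :=
  [("WBC", "5.1"), ("Glucose", "90"), ("Foo", "1")]

def Spec_categorize_blood_tests (results : List (String × String)) (out : List (String × List (String × String))) : Prop := out = categorize_blood_tests_alt results
instance (results : List (String × String)) (out : List (String × List (String × String))) : Decidable (Spec_categorize_blood_tests results out) := by unfold Spec_categorize_blood_tests; infer_instance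

-- ===== CLAIM (what is proved, stated in full; the proofs are below) =====
def Claim_equal_categorize_blood_tests : Prop := ∀ (results : List (String × String)), Dom_categorize_blood_tests results → Pre_categorize_blood_tests results → Spec_categorize_blood_tests results (categorize_blood_tests results)

-- ===== LEMMAS AND PROOFS =====

-- concrete facts about the fixed table and the inverted index
lemma tbl_names_nodup : (pvTable.map Prod.fst).Nodup := by decide
lemma tbl_no_other : ∀ ct ∈ pvTable, ct.1 ≠ "Other" := by decide
lemma tbl_tests_nodup : ∀ ct ∈ pvTable, ct.2.Nodup := by decide
lemma tbl_panelOf_get : ∀ ct ∈ pvTable, ∀ t ∈ ct.2, pvPanelOf.get? t = some ct.1 := by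
  have h : pvTable.all (fun ct => ct.2.all (fun t => pvPanelOf.get? t == some ct.1)) := by decide
  intro ct hct t ht
  have := (List.all_eq_true.mp h) ct hct
  have := (List.all_eq_true.mp this) t ht
  simpa using this
lemma panelOf_sound : ∀ tc ∈ pvPanelOf.items, ∃ ct ∈ pvTable, ct.1 = tc.2 ∧ tc.1 ∈ ct.2 := by
  have h : pvPanelOf.items.all (fun tc => pvTable.any (fun ct => ct.1 == tc.2 && ct.2.contains tc.1)) := by decide
  intro tc htc
  have := (List.all_eq_true.mp h) tc htc
  obtain ⟨ct, hct, hprop⟩ := List.any_eq_true.mp this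
  simp only [Bool.and_eq_true, beq_iff_eq, List.contains_eq_mem, decide_eq_true_eq] at hprop
  exact ⟨ct, hct, hprop.1, hprop.2⟩
lemma categories_items : (PySem.Dict.ofList (pvTable ++ [("Other", [])])).items = pvTable ++ [("Other", [])] := by decide

-- panel names are injective on the table
lemma tbl_name_inj : ∀ ct ∈ pvTable, ∀ ct' ∈ pvTable, ct.1 = ct'.1 → ct = ct' := by
  intro ct hct ct' hct' h
  exact List.inj_on_of_nodup_map tbl_names_nodup hct hct' h

-- the per-panel inner build ('{t: get(t) for t in tests if get(t) is not None}') as a filterMap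
lemma innerBuild (get : String → Option String) :
    ∀ (tests : List String) (d : PySem.Dict String String), tests.Nodup →
      (∀ t ∈ tests, d.contains t = false) →
      (tests.foldl (fun (cr : PySem.Dict String String) t =>
        match get t with | some v => cr.insert t v | none => cr) d).items
      = d.items ++ tests.filterMap (fun t => (get t).map (fun v => (t, v))) := by
  intro tests
  induction tests with
  | nil => intro d _ _; simp
  | cons t rest ih =>
    intro d hnd hfresh
    obtain ⟨hnotmem, hnd'⟩ := List.nodup_cons.mp hnd
    simp only [List.foldl_cons, List.filterMap_cons]
    cases hget : get t with
    | none =>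
      simp only [Option.map_none]
      exact ih d hnd' (fun u hu => hfresh u (List.mem_cons_of_mem _ hu))
    | some v =>
      simp only [Option.map_some]
      rw [ih (d.insert t v) hnd' ?fresh]
      · rw [PySem.Dict.items_insert_of_not_contains d v (hfresh t List.mem_cons_self)]
        simp
      case fresh =>
        intro u hu
        rw [PySem.Dict.contains_insert]
        have : u ≠ t := fun h => hnotmem (h ▸ hu)
        simp [this, hfresh u (List.mem_cons_of_mem _ hu)]

-- grouping pass: what ends up under key c
lemma groupGetD (key : String × String → String) (c : String) :
    ∀ (l : List (String × String)) (g : PySem.Dict String (PySem.Dict String String)),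
      (l.foldl (fun g tv => g.modify (key tv) PySem.Dict.empty (fun d => d.insert tv.1 tv.2)) g).getD c PySem.Dict.empty
      = (l.filter (fun tv => key tv == c)).foldl (fun d tv => d.insert tv.1 tv.2) (g.getD c PySem.Dict.empty) := by
  intro l
  induction l with
  | nil => intro g; simp
  | cons tv rest ih =>
    intro g
    simp only [List.foldl_cons, List.filter_cons]
    by_cases h : key tv = c
    · subst h
      simp only [beq_self_eq_true, if_true, List.foldl_cons]
      rw [ih]
      rw [PySem.Dict.getD_modify_self g (key tv) PySem.Dict.empty (fun d => d.insert tv.1 tv.2)]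
    · have hne : (key tv == c) = false := beq_eq_false_iff_ne.mpr h
      simp only [hne, Bool.false_eq_true, if_false]
      rw [ih]
      rw [PySem.Dict.getD_modify_of_ne g PySem.Dict.empty (fun d => d.insert tv.1 tv.2) (fun hc => h hc.symm)]

lemma groupContains (key : String × String → String) (c : String) :
    ∀ (l : List (String × String)) (g : PySem.Dict String (PySem.Dict String String)),
      (l.foldl (fun g tv => g.modify (key tv) PySem.Dict.empty (fun d => d.insert tv.1 tv.2)) g).contains c
      = (g.contains c || l.any (fun tv => key tv == c)) := by
  intro l
  induction l with
  | nil => intro g; simp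
  | cons tv rest ih =>
    intro g
    simp only [List.foldl_cons, List.any_cons]
    rw [ih]
    rw [PySem.Dict.contains_modify]
    by_cases h : key tv = c
    · simp [h]
    · have h1 : (c == key tv) = false := beq_eq_false_iff_ne.mpr (fun hc => h hc.symm)
      have h2 : (key tv == c) = false := beq_eq_false_iff_ne.mpr h
      simp [h1, h2]

-- the 'other' pass of A as a filter
lemma condSkipItems (p : String × String → Bool) :
    ∀ (l : List (String × String)) (d : PySem.Dict String String), (l.map Prod.fst).Nodup →
      (∀ tv ∈ l, d.contains tv.1 = false) →
      (l.foldl (fun (o : PySem.Dict String String) tv => if p tv then o else o.insert tv.1 tv.2) d).items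
      = d.items ++ l.filter (fun tv => !p tv) := by
  intro l
  induction l with
  | nil => intro d _ _; simp
  | cons tv rest ih =>
    intro d hnd hfresh
    rw [List.map_cons] at hnd
    obtain ⟨hnotmem, hnd'⟩ := List.nodup_cons.mp hnd
    simp only [List.foldl_cons, List.filter_cons]
    cases hp : p tv with
    | true =>
      simp only [if_true, Bool.not_true, Bool.false_eq_true, if_false]
      exact ih d hnd' (fun u hu => hfresh u (List.mem_cons_of_mem _ hu))
    | false =>
      simp only [Bool.false_eq_true, if_false, Bool.not_false, if_true]
      rw [ih (d.insert tv.1 tv.2) hnd' ?fresh]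
      · rw [PySem.Dict.items_insert_of_not_contains d tv.2 (hfresh tv List.mem_cons_self)]
        simp
      case fresh =>
        intro u hu
        rw [PySem.Dict.contains_insert]
        have : u.1 ≠ tv.1 := by
          intro h
          exact hnotmem (h ▸ List.mem_map_of_mem hu)
        simp [this, hfresh u (List.mem_cons_of_mem _ hu)]

-- proof-only canonical form of both outputs
def crListA (results : List (String × String)) (ct : String × List String) : List (String × String) :=
  ct.2.filterMap (fun t => ((PySem.Dict.mk results).get? t).map (fun v => (t, v)))

def otherListA (results : List (String × String)) : List (String × String) :=
  results.filter (fun tv => !(pvTable.any (fun p => p.2.contains tv.1)))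

def canonA (results : List (String × String)) : List (String × List (String × String)) :=
  ((pvTable.filter (fun ct => !(crListA results ct).isEmpty)).map (fun ct => (ct.1, crListA results ct)))
  ++ (if (otherListA results).isEmpty then [] else [("Other", otherListA results)])

-- the outer loop of A (insert panels with a nonempty block, in table order) as filter+map
lemma outer_fold (F : (String × List String) → PySem.Dict String String) :
    ∀ (table : List (String × List String)) (acc : PySem.Dict String (PySem.Dict String String)),
      (∀ ct ∈ table, acc.contains ct.1 = false) → (table.map Prod.fst).Nodup →
      (table.foldl (fun acc ct => if (F ct).items ≠ [] then acc.insert ct.1 (F ct) else acc) acc).items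
      = acc.items ++ (table.filter (fun ct => !(F ct).items.isEmpty)).map (fun ct => (ct.1, F ct)) := by
  intro table
  induction table with
  | nil => intro acc _ _; simp
  | cons ct rest ih =>
    intro acc hfresh hnd
    rw [List.map_cons] at hnd
    obtain ⟨hnotmem, hnd'⟩ := List.nodup_cons.mp hnd
    simp only [List.foldl_cons, List.filter_cons]
    by_cases h : (F ct).items = []
    · have : (F ct).items.isEmpty = true := by simp [h]
      simp only [h, ne_eq, not_true_eq_false, if_false]
      exact ih acc (fun u hu => hfresh u (List.mem_cons_of_mem _ hu)) hnd'
    · have : (F ct).items.isEmpty = false := by simpa [List.isEmpty_iff] using h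
      simp only [ne_eq, h, not_false_eq_true, if_true, this, Bool.not_false]
      rw [ih (acc.insert ct.1 (F ct)) ?fresh hnd']
      · rw [PySem.Dict.items_insert_of_not_contains acc (F ct) (hfresh ct List.mem_cons_self)]
        simp
      case fresh =>
        intro u hu
        rw [PySem.Dict.contains_insert]
        have : u.1 ≠ ct.1 := fun hh => hnotmem (hh ▸ List.mem_map_of_mem hu)
        simp [this, hfresh u (List.mem_cons_of_mem _ hu)]

-- the outer loop of B (insert panels present in `grouped`, in table order) as filter+map
lemma outer_fold_b (q : (String × List String) → Bool) (G : (String × List String) → PySem.Dict String String) :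
    ∀ (table : List (String × List String)) (acc : PySem.Dict String (PySem.Dict String String)),
      (∀ ct ∈ table, acc.contains ct.1 = false) → (table.map Prod.fst).Nodup →
      (table.foldl (fun acc ct => if q ct then acc.insert ct.1 (G ct) else acc) acc).items
      = acc.items ++ (table.filter q).map (fun ct => (ct.1, G ct)) := by
  intro table
  induction table with
  | nil => intro acc _ _; simp
  | cons ct rest ih =>
    intro acc hfresh hnd
    rw [List.map_cons] at hnd
    obtain ⟨hnotmem, hnd'⟩ := List.nodup_cons.mp hnd
    simp only [List.foldl_cons, List.filter_cons]
    cases hq : q ct with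
    | false =>
      simp only [Bool.false_eq_true, if_false]
      exact ih acc (fun u hu => hfresh u (List.mem_cons_of_mem _ hu)) hnd'
    | true =>
      simp only [if_true]
      rw [ih (acc.insert ct.1 (G ct)) ?fresh hnd']
      · rw [PySem.Dict.items_insert_of_not_contains acc (G ct) (hfresh ct List.mem_cons_self)]
        simp
      case fresh =>
        intro u hu
        rw [PySem.Dict.contains_insert]
        have : u.1 ≠ ct.1 := fun hh => hnotmem (hh ▸ List.mem_map_of_mem hu)
        simp [this, hfresh u (List.mem_cons_of_mem _ hu)]

lemma A_canon (results : List (String × String)) (hnd : (results.map Prod.fst).Nodup) :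
    categorize_blood_tests results = canonA results := by
  unfold categorize_blood_tests
  simp only [categories_items]
  have hany : ∀ tv : String × String,
      ((pvTable ++ [("Other", [])]).any fun p => decide (p.1 ≠ "Other") && p.2.contains tv.1)
      = pvTable.any (fun p => p.2.contains tv.1) := by
    intro tv
    rw [List.any_append]
    have h2 : ([("Other", ([] : List String))].any fun p => decide (p.1 ≠ "Other") && p.2.contains tv.1) = false := by
      simp
    rw [h2, Bool.or_false]
    exact PySem.List.any_congr_mem (fun p hp => by simp [tbl_no_other p hp])
  simp only [hany]
  have hemp : (PySem.Dict.empty : PySem.Dict String String).items = [] := rfl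
  have hoth := condSkipItems (fun tv => pvTable.any (fun p => p.2.contains tv.1)) results PySem.Dict.empty hnd
      (fun _ _ => PySem.Dict.contains_empty _)
  beta_reduce at hoth
  rw [hemp, List.nil_append] at hoth
  simp only [hoth]
  rw [List.foldl_append]
  simp only [List.foldl_cons, List.foldl_nil, hemp, ne_eq, not_true_eq_false, if_false]
  have houter := outer_fold (fun ct => List.foldl (fun (cr : PySem.Dict String String) t =>
        match (PySem.Dict.mk results).get? t with | some v => cr.insert t v | none => cr) PySem.Dict.empty ct.2)
      pvTable PySem.Dict.empty (fun _ _ => PySem.Dict.contains_empty _) tbl_names_nodup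
  have hemp2 : (PySem.Dict.empty : PySem.Dict String (PySem.Dict String String)).items = [] := rfl
  beta_reduce at houter
  rw [hemp2, List.nil_append] at houter
  have hF : ∀ ct ∈ pvTable, (List.foldl (fun (cr : PySem.Dict String String) t =>
        match (PySem.Dict.mk results).get? t with | some v => cr.insert t v | none => cr) PySem.Dict.empty ct.2).items
      = crListA results ct := by
    intro ct hct
    have := innerBuild ((PySem.Dict.mk results).get?) ct.2 PySem.Dict.empty (tbl_tests_nodup ct hct)
      (fun _ _ => PySem.Dict.contains_empty _)
    rw [hemp, List.nil_append] at this
    exact this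
  have hcont : (List.foldl (fun acc ct =>
      if (List.foldl (fun (cr : PySem.Dict String String) t =>
          match (PySem.Dict.mk results).get? t with | some v => cr.insert t v | none => cr) PySem.Dict.empty ct.2).items ≠ [] then
        acc.insert ct.1 (List.foldl (fun (cr : PySem.Dict String String) t =>
          match (PySem.Dict.mk results).get? t with | some v => cr.insert t v | none => cr) PySem.Dict.empty ct.2)
      else acc) (PySem.Dict.empty : PySem.Dict String (PySem.Dict String String)) pvTable).contains "Other" = false := by
    rw [PySem.Dict.contains_eq_decide_mem_keys]
    simp only [PySem.Dict.keys, houter, List.map_map, Function.comp, decide_eq_false_iff_not, List.mem_map,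
      not_exists, not_and]
    intro ct hmem hfst
    exact tbl_no_other ct (List.mem_of_mem_filter hmem) (by simpa using hfst)
  unfold canonA
  by_cases ho : otherListA results = []
  · rw [if_neg (by simpa [otherListA] using ho)]
    rw [houter]
    have : (otherListA results).isEmpty = true := by simp [ho]
    rw [this]
    simp only [if_true, List.append_nil, List.map_map]
    rw [List.filter_congr (fun ct hct => by rw [hF ct hct])]
    apply List.map_congr_left
    intro ct hct
    simp only [Function.comp]
    rw [hF ct (List.mem_of_mem_filter hct)]
  · rw [if_pos (by simpa [otherListA] using ho)]
    rw [PySem.Dict.items_insert_of_not_contains _ _ hcont]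
    have : (otherListA results).isEmpty = false := by simp [ho]
    rw [this]
    simp only [Bool.false_eq_true, if_false, List.map_append, houter, List.map_map]
    congr 1
    · rw [List.filter_congr (fun ct hct => by rw [hF ct hct])]
      apply List.map_congr_left
      intro ct hct
      simp only [Function.comp]
      rw [hF ct (List.mem_of_mem_filter hct)]
    · simp only [List.map_cons, List.map_nil]
      rw [hoth]
      rfl


lemma B_canon (results : List (String × String)) (hnd : (results.map Prod.fst).Nodup) :
    categorize_blood_tests_alt results = canonA results := by
  unfold categorize_blood_tests_alt
  simp only []
  set G2 : PySem.Dict String (PySem.Dict String String) :=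
    List.foldl (fun g tv => g.modify (pvPanelOf.getD tv.1 "Other") PySem.Dict.empty (fun d => d.insert tv.1 tv.2))
      PySem.Dict.empty results with hG2
  -- grouped: what sits under each key
  have hemp : (PySem.Dict.empty : PySem.Dict String String).items = [] := rfl
  have h1 : ∀ c, (G2.getD c PySem.Dict.empty).items
      = results.filter (fun tv => pvPanelOf.getD tv.1 "Other" == c) := by
    intro c
    rw [hG2, groupGetD (fun tv => pvPanelOf.getD tv.1 "Other") c results PySem.Dict.empty]
    rw [PySem.Dict.getD_empty]
    rw [PySem.Dict.items_foldl_insert_fresh _ Prod.fst Prod.snd _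
        (fun a _ => PySem.Dict.contains_empty _)
        (hnd.sublist ((List.filter_sublist (l := results)).map Prod.fst))]
    simp [hemp]
  have h2 : ∀ c, G2.contains c = results.any (fun tv => pvPanelOf.getD tv.1 "Other" == c) := by
    intro c
    rw [hG2, groupContains (fun tv => pvPanelOf.getD tv.1 "Other") c results PySem.Dict.empty]
    rw [PySem.Dict.contains_empty, Bool.false_or]
  have hndg : ∀ c, (G2.getD c PySem.Dict.empty).keys.Nodup := by
    intro c
    simp only [PySem.Dict.keys, h1]
    exact hnd.sublist ((List.filter_sublist (l := results)).map Prod.fst)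
  have hndr : (PySem.Dict.mk results).keys.Nodup := hnd
  -- pointwise: inside a panel, the group lookup agrees with the results lookup
  have hP1 : ∀ ct ∈ pvTable, ∀ t ∈ ct.2,
      (G2.getD ct.1 PySem.Dict.empty).get? t = (PySem.Dict.mk results).get? t := by
    intro ct hct t ht
    have hkey : pvPanelOf.getD t "Other" = ct.1 :=
      PySem.Dict.getD_of_get?_eq_some _ _ (tbl_panelOf_get ct hct t ht)
    cases hres : (PySem.Dict.mk results).get? t with
    | none =>
      cases hg : (G2.getD ct.1 PySem.Dict.empty).get? t with
      | none => rfl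
      | some v =>
        have hmem := PySem.Dict.mem_items_of_get?_eq_some _ hg
        rw [h1] at hmem
        have := PySem.Dict.get?_of_mem_items (PySem.Dict.mk results)
          (List.mem_of_mem_filter hmem) hndr
        rw [hres] at this
        cases this
    | some v =>
      have hmem : (t, v) ∈ results := PySem.Dict.mem_items_of_get?_eq_some _ hres
      have hmf : (t, v) ∈ results.filter (fun tv => pvPanelOf.getD tv.1 "Other" == ct.1) := by
        simp only [List.mem_filter]
        exact ⟨hmem, by simp [hkey]⟩
      rw [← h1] at hmf
      exact PySem.Dict.get?_of_mem_items _ hmf (hndg ct.1)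
  -- presence of a panel in grouped = its block in A is nonempty
  have hP2 : ∀ ct ∈ pvTable, G2.contains ct.1 = !(crListA results ct).isEmpty := by
    intro ct hct
    rw [h2]
    rw [Bool.eq_iff_iff]
    constructor
    · intro hA
      obtain ⟨tv, htv, hk⟩ := List.any_eq_true.mp hA
      have hk' : pvPanelOf.getD tv.1 "Other" = ct.1 := by simpa using hk
      cases hg : pvPanelOf.get? tv.1 with
      | none =>
        rw [PySem.Dict.getD_of_get?_eq_none _ _ hg] at hk'
        exact absurd hk'.symm (tbl_no_other ct hct)
      | some c' =>
        rw [PySem.Dict.getD_of_get?_eq_some _ _ hg] at hk'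
        subst hk'
        obtain ⟨ct', hct', hc1, hc2⟩ := panelOf_sound _ (PySem.Dict.mem_items_of_get?_eq_some _ hg)
        have hee : ct' = ct := tbl_name_inj ct' hct' ct hct hc1
        rw [hee] at hc2
        have hres : (PySem.Dict.mk results).get? tv.1 = some tv.2 := by
          exact PySem.Dict.get?_of_mem_items _ (by simpa using htv) hndr
        have hmm : (tv.1, tv.2) ∈ crListA results ct :=
          List.mem_filterMap.mpr ⟨tv.1, hc2, by rw [hres]; rfl⟩
        simp [List.ne_nil_of_mem hmm]
    · intro hB
      obtain ⟨x, hx⟩ := List.exists_mem_of_ne_nil (crListA results ct) (by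
        intro hh
        rw [hh] at hB
        simp at hB)
      obtain ⟨t, ht, hopt⟩ := List.mem_filterMap.mp hx
      cases hres : (PySem.Dict.mk results).get? t with
      | none => rw [hres] at hopt; cases hopt
      | some v =>
        have hmem : (t, v) ∈ results := PySem.Dict.mem_items_of_get?_eq_some _ hres
        refine List.any_eq_true.mpr ⟨(t, v), hmem, ?_⟩
        simp [PySem.Dict.getD_of_get?_eq_some _ _ (tbl_panelOf_get ct hct t ht)]
  -- a test is grouped under "Other" iff it is in no panel
  have hP3 : ∀ t : String, (pvPanelOf.getD t "Other" == "Other") = !(pvTable.any (fun p => p.2.contains t)) := by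
    intro t
    cases hin : pvTable.any (fun p => p.2.contains t) with
    | true =>
      obtain ⟨p, hp, hcp⟩ := List.any_eq_true.mp hin
      have hgd : pvPanelOf.getD t "Other" = p.1 :=
        PySem.Dict.getD_of_get?_eq_some _ _ (tbl_panelOf_get p hp t (by simpa using hcp))
      simp [hgd, tbl_no_other p hp]
    | false =>
      have hnone : pvPanelOf.get? t = none := by
        cases hg : pvPanelOf.get? t with
        | none => rfl
        | some c =>
          obtain ⟨ct', hct', _, hc2⟩ := panelOf_sound _ (PySem.Dict.mem_items_of_get?_eq_some _ hg)
          rw [List.any_eq_true.mpr ⟨ct', hct', by simpa using hc2⟩] at hin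
          cases hin
      simp [PySem.Dict.getD_of_get?_eq_none _ _ hnone]
  -- the "Other" block of B is A's other list
  have hOitems : (G2.getD "Other" PySem.Dict.empty).items = otherListA results := by
    rw [h1]
    unfold otherListA
    exact List.filter_congr (fun tv _ => hP3 tv.1)
  have hOcond : G2.contains "Other" = !(otherListA results).isEmpty := by
    rw [h2]
    rw [PySem.List.any_congr_mem (fun tv _ => hP3 tv.1)]
    unfold otherListA
    cases hfe : (List.filter (fun tv => !pvTable.any fun p => p.2.contains tv.1) results).isEmpty with
    | true =>
      simp only [Bool.not_true]
      rw [List.isEmpty_iff, List.filter_eq_nil_iff] at hfe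
      exact List.any_eq_false.mpr hfe
    | false =>
      simp only [Bool.not_false]
      have hne : List.filter (fun tv => !pvTable.any fun p => p.2.contains tv.1) results ≠ [] := by
        intro hh
        rw [hh] at hfe
        cases hfe
      obtain ⟨x, hx⟩ := List.exists_mem_of_ne_nil _ hne
      rw [List.mem_filter] at hx
      exact List.any_eq_true.mpr ⟨x, hx.1, hx.2⟩
  -- the outer loop of B
  have houterB := outer_fold_b (fun ct => G2.contains ct.1)
      (fun ct => List.foldl (fun (cr : PySem.Dict String String) t =>
        match (G2.getD ct.1 PySem.Dict.empty).get? t with | some v => cr.insert t v | none => cr)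
        PySem.Dict.empty ct.2)
      pvTable PySem.Dict.empty (fun _ _ => PySem.Dict.contains_empty _) tbl_names_nodup
  have hemp2 : (PySem.Dict.empty : PySem.Dict String (PySem.Dict String String)).items = [] := rfl
  beta_reduce at houterB
  rw [hemp2, List.nil_append] at houterB
  have hGct : ∀ ct ∈ pvTable, (List.foldl (fun (cr : PySem.Dict String String) t =>
      match (G2.getD ct.1 PySem.Dict.empty).get? t with | some v => cr.insert t v | none => cr)
      PySem.Dict.empty ct.2).items = crListA results ct := by
    intro ct hct
    have := innerBuild ((G2.getD ct.1 PySem.Dict.empty).get?) ct.2 PySem.Dict.empty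
      (tbl_tests_nodup ct hct) (fun _ _ => PySem.Dict.contains_empty _)
    rw [hemp, List.nil_append] at this
    rw [this]
    exact List.filterMap_congr (fun t ht => by rw [hP1 ct hct t ht])
  have hcontB : (List.foldl (fun out ct =>
      if G2.contains ct.1 = true then
        out.insert ct.1 (List.foldl (fun (cr : PySem.Dict String String) t =>
          match (G2.getD ct.1 PySem.Dict.empty).get? t with | some v => cr.insert t v | none => cr)
          PySem.Dict.empty ct.2)
      else out) (PySem.Dict.empty : PySem.Dict String (PySem.Dict String String)) pvTable).contains "Other" = false := by
    rw [PySem.Dict.contains_eq_decide_mem_keys]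
    simp only [PySem.Dict.keys, houterB, List.map_map, Function.comp, decide_eq_false_iff_not, List.mem_map,
      not_exists, not_and]
    intro ct hmem hfst
    exact tbl_no_other ct (List.mem_of_mem_filter hmem) (by simpa using hfst)
  unfold canonA
  by_cases ho : otherListA results = []
  · have hoc : G2.contains "Other" = false := by
      rw [hOcond]
      simp [ho]
    rw [hoc]
    simp only [Bool.false_eq_true, if_false]
    rw [houterB]
    have : (otherListA results).isEmpty = true := by simp [ho]
    rw [this]
    simp only [if_true, List.append_nil, List.map_map]
    rw [List.filter_congr (fun ct hct => hP2 ct hct)]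
    apply List.map_congr_left
    intro ct hct
    simp only [Function.comp]
    rw [hGct ct (List.mem_of_mem_filter hct)]
  · have hoc : G2.contains "Other" = true := by
      rw [hOcond]
      simp [ho]
    rw [hoc]
    simp only [if_true]
    rw [PySem.Dict.items_insert_of_not_contains _ _ hcontB]
    have : (otherListA results).isEmpty = false := by simp [ho]
    rw [this]
    simp only [Bool.false_eq_true, if_false, List.map_append, houterB, List.map_map]
    congr 1
    · rw [List.filter_congr (fun ct hct => hP2 ct hct)]
      apply List.map_congr_left
      intro ct hct
      simp only [Function.comp]
      rw [hGct ct (List.mem_of_mem_filter hct)]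
    · simp only [List.map_cons, List.map_nil]
      rw [hOitems]

theorem categorize_blood_tests_spec : Claim_equal_categorize_blood_tests := by
  intro results _hdom hnd
  unfold Spec_categorize_blood_tests
  rw [A_canon results hnd, B_canon results hnd]
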